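-- pv_equiv track=rewrite | github.com/jrhdezesp/AlgoritmosYEstructuras_20211930118 | Jose_Hernandez_AED_20211930118/Ejercicios Python AED/CAP2/EJ 2.5.py | combinar
-- ===== SOURCE A (Python) =====
-- def combinar(arr):
--     # Crear un diccionario para agrupar elementos por número aleatorio
--     g = {}
--     for lk, n in arr:
--         if n in g:
--             g[n].append(lk)
--         else:
--             g[n] = [lk]
--     # Crear una lista de elementos combinados
--     combi = []
--     for n, l in g.items():
--         if len(l) > 1:
--             combi.append((''.join(sorted(l)), n))
--         else:
--             combi.append((l[0], n))
--     return combi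
-- ===== SOURCE B (Python) =====
-- def combinar(arr):
--     # Distinct keys in first-appearance order, then one rescan of arr per key.
--     order = list(dict.fromkeys(n for _, n in arr))
--     return [(''.join(sorted([lk for lk, m in arr if m == n])), n) for n in order]
-- ===== Notes on version B (the rewrite author's own statement) =====
-- stated objective: alternative
-- what changed: B replaces A's single grouping pass over a mutable dict with a first-appearance dedup of the keys followed by one filtering rescan of arr per distinct key, joining the sorted group uniformly (no singleton special case).
import Mathlib
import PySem

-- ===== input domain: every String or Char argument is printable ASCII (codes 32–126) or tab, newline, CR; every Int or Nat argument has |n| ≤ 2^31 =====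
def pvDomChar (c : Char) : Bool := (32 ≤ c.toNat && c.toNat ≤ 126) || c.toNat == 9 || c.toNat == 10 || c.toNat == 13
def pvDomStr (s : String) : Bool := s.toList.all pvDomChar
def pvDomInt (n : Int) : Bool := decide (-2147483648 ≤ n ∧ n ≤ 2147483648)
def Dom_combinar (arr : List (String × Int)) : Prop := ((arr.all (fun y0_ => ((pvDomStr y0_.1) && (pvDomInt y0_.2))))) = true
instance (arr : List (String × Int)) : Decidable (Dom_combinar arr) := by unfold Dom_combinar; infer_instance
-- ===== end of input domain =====

-- B groups by deduplicating the keys and rescanning the list per key, instead of A's one-pass mutable dict; same result, alternative structure.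

-- ===== PORT A =====
def combinar (arr : List (String × Int)) : List (String × Int) :=
  let g : PySem.Dict Int (List String) := arr.foldl
    (fun g p => if g.contains p.2 then g.insert p.2 (g.getD p.2 [] ++ [p.1])
                else g.insert p.2 [p.1]) PySem.Dict.empty
  g.items.foldl
    (fun combi q =>
      if 1 < q.2.length then
        combi ++ [(PySem.Str.join "" (PySem.List.sorted q.2 (fun x => x) false), q.1)]
      else
        combi ++ [((PySem.List.pyGet? q.2 0).getD "", q.1)]) []
        -- l[0]: total form; every group list the loop reaches is nonempty, so pyGet? is some

-- ===== PORT B =====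
def combinar_alt (arr : List (String × Int)) : List (String × Int) :=
  let order := PySem.List.dedup (arr.map (fun p => p.2))
  order.map (fun n =>
    (PySem.Str.join ""
       (PySem.List.sorted ((arr.filter (fun p => p.2 == n)).map (fun p => p.1)) (fun x => x) false),
     n))

-- ===== PRECONDITION & SPEC =====
def Spec_combinar (arr : List (String × Int)) (out : List (String × Int)) : Prop := out = combinar_alt arr
instance (arr : List (String × Int)) (out : List (String × Int)) : Decidable (Spec_combinar arr out) := by unfold Spec_combinar; infer_instance

-- ===== CLAIM (what is proved, stated in full; the proofs are below) =====
def Claim_equal_combinar : Prop := ∀ (arr : List (String × Int)), Dom_combinar arr → Spec_combinar arr (combinar arr)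

-- ===== LEMMAS AND PROOFS =====

-- A's grouping step is exactly Dict.modify with default []
lemma step_eq_modify (g : PySem.Dict Int (List String)) (p : String × Int) :
    (if g.contains p.2 then g.insert p.2 (g.getD p.2 [] ++ [p.1]) else g.insert p.2 [p.1])
      = g.modify p.2 [] (fun l => l ++ [p.1]) := by
  unfold PySem.Dict.modify
  by_cases h : g.contains p.2 = true <;>
    simp [h, PySem.Dict.getD_of_not_contains, PySem.Dict.getD_eq_get?_getD]

lemma fold_eq_modify (arr : List (String × Int)) (d : PySem.Dict Int (List String)) :
    arr.foldl (fun g p => if g.contains p.2 then g.insert p.2 (g.getD p.2 [] ++ [p.1])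
                          else g.insert p.2 [p.1]) d
      = arr.foldl (fun g p => g.modify p.2 [] (fun l => l ++ [p.1])) d := by
  induction arr generalizing d with
  | nil => rfl
  | cons p t ih => simp [List.foldl_cons, step_eq_modify]

lemma fold_swap (arr : List (String × Int)) (d : PySem.Dict Int (List String)) :
    arr.foldl (fun g p => g.modify p.2 [] (fun l => l ++ [p.1])) d
      = (arr.map (fun p => (p.2, p.1))).foldl
          (fun g q => g.modify q.1 [] (fun l => l ++ [q.2])) d := by
  rw [List.foldl_map]

-- the output loop is a map
lemma out_loop_eq_map (l : List (Int × List String)) (acc : List (String × Int)) :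
    l.foldl (fun combi q =>
      if 1 < q.2.length then
        combi ++ [(PySem.Str.join "" (PySem.List.sorted q.2 (fun x => x) false), q.1)]
      else
        combi ++ [((PySem.List.pyGet? q.2 0).getD "", q.1)]) acc
    = acc ++ l.map (fun q =>
        if 1 < q.2.length then
          (PySem.Str.join "" (PySem.List.sorted q.2 (fun x => x) false), q.1)
        else ((PySem.List.pyGet? q.2 0).getD "", q.1)) := by
  induction l generalizing acc with
  | nil => simp
  | cons q t ih => by_cases h : 1 < q.2.length <;> simp [List.foldl_cons, h, ih]

lemma join_singleton_str (s : String) : PySem.Str.join "" [s] = s := by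
  unfold PySem.Str.join
  simp [PySem.Chars.join, List.intercalate]

-- ===== VERDICT (by name: the statement is the Claim_ definition above) =====
theorem combinar_spec : Claim_equal_combinar := by
  intro arr _
  unfold Spec_combinar combinar combinar_alt
  rw [fold_eq_modify, fold_swap]
  dsimp only
  set G := (arr.map (fun p => (p.2, p.1))).foldl
      (fun g q => g.modify q.1 [] (fun l => l ++ [q.2])) PySem.Dict.empty with hG
  have hnd : G.keys.Nodup := by
    rw [hG]
    exact PySem.Dict.nodup_keys_foldl_modify_key (arr.map (fun p => (p.2, p.1)))
      (fun q : Int × String => q.1) [] (fun _ q => (fun l => l ++ [q.2])) PySem.Dict.empty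
      (by simp [PySem.Dict.keys_empty])
  have hkeys : G.keys = PySem.List.dedup (arr.map (fun p => p.2)) := by
    rw [hG]
    have := PySem.Dict.keys_foldl_modify_key (arr.map (fun p => (p.2, p.1)))
      (fun q : Int × String => q.1) [] (fun _ q => (fun l => l ++ [q.2])) PySem.Dict.empty
    rw [this]
    simp [PySem.Set.update, Function.comp_def, PySem.List.dedup_eq_ofList,
      PySem.Set.ofList_eq_foldl, PySem.Dict.keys_empty]
  have hgetD : ∀ c : Int, G.getD c []
      = (arr.filter (fun p => p.2 == c)).map (fun p => p.1) := by
    intro c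
    rw [hG, PySem.Dict.getD_foldl_modify_append]
    simp [PySem.Dict.getD_empty, List.filter_map, Function.comp_def]
  rw [PySem.Dict.items_eq_map_keys G hnd [], out_loop_eq_map, List.nil_append,
    List.map_map, hkeys]
  apply List.map_congr_left
  intro k hk
  simp only [Function.comp]
  rw [hgetD]
  set l := (arr.filter (fun p => p.2 == k)).map (fun p => p.1) with hl
  have hne : l ≠ [] := by
    have hk' : k ∈ arr.map (fun p => p.2) := by
      simpa [PySem.List.mem_dedup] using hk
    obtain ⟨p, hp, hpk⟩ := List.mem_map.mp hk'
    have : p.1 ∈ l := by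
      rw [hl]
      exact List.mem_map.mpr ⟨p, List.mem_filter.mpr ⟨hp, by simp [hpk]⟩, rfl⟩
    exact List.ne_nil_of_mem this
  by_cases hlen : 1 < l.length
  · simp [hlen]
  · match l, hne, hlen with
    | [s], _, _ =>
      simp [PySem.List.pyGet?, PySem.List.pyIdx?, PySem.List.sorted,
        PySem.List.insertBy, join_singleton_str]
    | s :: t :: r, _, hlen => simp at hlen
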